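-- pv_equiv track=rewrite | github.com/KristinaPalmquist/Lexicon | python/Codingbat/front_back.py | front_back
-- ===== SOURCE A (Python) =====
-- def front_back(str):
--     length = len(str)
--     if length == 0 or length == 1:
--         return ''
--     first = str[0]
--     last = str[length-1]
--     new_list = []
--     for i in range(length):
--         if i == 0:
--             new_list.append(last)
--         elif i == length-1:
--             new_list.append(first)
--         else:
--             new_list.append(str[i])
--     return ''.join(new_list)
-- ===== SOURCE B (Python) =====
-- def front_back(str):
--     if len(str) <= 1:
--         return ''
--     return str[-1] + str[1:-1] + str[0]
-- ===== Notes on version B (the rewrite author's own statement) =====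
-- stated objective: simpler
-- what changed: Replaces the per-index loop with branches for i==0 and i==length-1 and list accumulation by the single closed-form slice expression str[-1] + str[1:-1] + str[0].
import Mathlib
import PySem

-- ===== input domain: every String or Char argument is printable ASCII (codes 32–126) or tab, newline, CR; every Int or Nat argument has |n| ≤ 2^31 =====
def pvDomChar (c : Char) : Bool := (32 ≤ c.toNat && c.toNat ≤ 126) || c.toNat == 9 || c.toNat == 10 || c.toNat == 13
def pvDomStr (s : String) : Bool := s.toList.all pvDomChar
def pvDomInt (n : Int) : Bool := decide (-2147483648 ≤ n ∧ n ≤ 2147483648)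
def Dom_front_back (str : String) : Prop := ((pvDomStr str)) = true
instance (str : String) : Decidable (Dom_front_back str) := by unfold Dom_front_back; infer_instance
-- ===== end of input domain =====

-- B replaces A's per-index loop (with branches for i == 0 and i == length-1) by the
-- single closed-form expression str[-1] + str[1:-1] + str[0]; objective: simpler.

-- ===== PORT A =====
-- str[0], str[length-1], str[i] are all in range under the guard, so pyGetD's default is never used
def front_back (str : String) : String :=
  let cs := str.toList
  let length : Int := PySem.Str.len str
  if length = 0 ∨ length = 1 then "" else
    let first := PySem.List.pyGetD cs 0 ' '
    let last := PySem.List.pyGetD cs (length - 1) ' '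
    let new_list := (PySem.List.pyRange 0 length 1).foldl
      (fun acc i =>
        if i = 0 then acc ++ [last]
        else if i = length - 1 then acc ++ [first]
        else acc ++ [PySem.List.pyGetD cs i ' ']) []
    String.ofList new_list

-- ===== PORT B =====
-- str[-1] and str[0] are in range under the guard, so pyGetD's default is never used
def front_back_alt (str : String) : String :=
  let cs := str.toList
  if cs.length ≤ 1 then "" else
    String.ofList ([PySem.List.pyGetD cs (-1) ' ']
      ++ PySem.List.slice cs (some 1) (some (-1))
      ++ [PySem.List.pyGetD cs 0 ' '])

-- ===== PRECONDITION & SPEC =====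
def Spec_front_back (str : String) (out : String) : Prop := out = front_back_alt str
instance (str : String) (out : String) : Decidable (Spec_front_back str out) := by unfold Spec_front_back; infer_instance

-- ===== CLAIM (what is proved, stated in full; the proofs are below) =====
def Claim_equal_front_back : Prop := ∀ (str : String), Dom_front_back str → Spec_front_back str (front_back str)

-- ===== LEMMAS AND PROOFS =====

-- A's loop body, written as a map over the index range, produces z :: mid ++ [a]
theorem fb_map (a z : Char) (mid : List Char) :
    (List.range (mid.length + 2)).map
      ((fun i =>
        if i = 0 then PySem.List.pyGetD (a :: (mid ++ [z])) ((mid.length : Int) + 2 - 1) ' '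
        else if i = (mid.length : Int) + 2 - 1 then PySem.List.pyGetD (a :: (mid ++ [z])) 0 ' '
        else PySem.List.pyGetD (a :: (mid ++ [z])) i ' ') ∘ (fun k : Nat => (0 : Int) + k))
    = z :: (mid ++ [a]) := by
  apply List.ext_getElem
  · simp
  · intro k h1 h2
    simp only [List.getElem_map, List.getElem_range, Function.comp_apply, Int.zero_add]
    simp only [List.length_map, List.length_range] at h1
    rcases k with _ | k
    · rw [if_pos (by norm_num)]
      have h : (mid.length : Int) + 2 - 1 = ((mid.length + 1 : Nat) : Int) := by push_cast; omega
      rw [h, PySem.List.pyGetD_natCast]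
      simp [List.getD]
    · by_cases hkl : k = mid.length
      · subst hkl
        rw [if_neg (by push_cast; omega), if_pos (by push_cast; omega),
          show (0:Int) = ((0:Nat):Int) from rfl, PySem.List.pyGetD_natCast]
        simp [List.getD]
      · have hk2 : k < mid.length := by omega
        rw [if_neg (by push_cast; omega), if_neg (by push_cast; omega),
          PySem.List.pyGetD_natCast]
        simp [List.getD, List.getElem?_append_left hk2, List.getElem?_eq_getElem hk2,
          List.getElem_append_left hk2]

-- the two ports agree on any string of length ≥ 2
theorem fb_lists (str : String) (a z : Char) (mid : List Char)
    (hcs : str.toList = a :: (mid ++ [z])) :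
    front_back str = front_back_alt str := by
  unfold front_back front_back_alt
  have hlen : PySem.Str.len str = (mid.length : Int) + 2 := by
    simp [PySem.Str.len_eq, hcs]; ring
  simp only [hcs, hlen]
  rw [if_neg (by omega), if_neg (by simp)]
  rw [show (fun (acc : List Char) (i : Int) =>
        if i = 0 then acc ++ [PySem.List.pyGetD (a :: (mid ++ [z])) ((mid.length : Int) + 2 - 1) ' ']
        else if i = (mid.length : Int) + 2 - 1 then acc ++ [PySem.List.pyGetD (a :: (mid ++ [z])) 0 ' ']
        else acc ++ [PySem.List.pyGetD (a :: (mid ++ [z])) i ' ']) =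
      (fun acc i => acc ++ [if i = 0 then PySem.List.pyGetD (a :: (mid ++ [z])) ((mid.length : Int) + 2 - 1) ' '
        else if i = (mid.length : Int) + 2 - 1 then PySem.List.pyGetD (a :: (mid ++ [z])) 0 ' '
        else PySem.List.pyGetD (a :: (mid ++ [z])) i ' ']) from by funext acc i; split_ifs <;> rfl]
  rw [PySem.List.foldl_append_singleton_eq_map, PySem.List.pyRange_one]
  simp only [List.nil_append, List.map_map, Int.sub_zero]
  rw [show ((mid.length : Int) + 2).toNat = mid.length + 2 from by omega]
  rw [fb_map]
  have hneg : PySem.List.pyGetD (a :: (mid ++ [z])) (-1) ' ' = z := by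
    simp [PySem.List.pyGetD, PySem.List.pyGet?, PySem.List.pyIdx?]
  have hslice : PySem.List.slice (a :: (mid ++ [z])) (some 1) (some (-1)) = mid := by
    simp [PySem.List.slice]
  have h0 : PySem.List.pyGetD (a :: (mid ++ [z])) 0 ' ' = a := by
    rw [show (0:Int) = ((0:Nat):Int) from rfl, PySem.List.pyGetD_natCast]
    simp [List.getD]
  rw [hneg, hslice, h0]
  rfl

theorem fb_main (str : String) : front_back str = front_back_alt str := by
  match h : str.toList with
  | [] => simp [front_back, front_back_alt, PySem.Str.len_eq, h]
  | [c] => simp [front_back, front_back_alt, PySem.Str.len_eq, h]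
  | c :: d :: rest =>
    rcases List.eq_nil_or_concat (d :: rest) with hnil | ⟨mid, z, hmz⟩
    · simp at hnil
    · exact fb_lists str c z mid (by rw [h, hmz]; simp)

-- ===== VERDICT (by name: the statement is the Claim_ definition above) =====
theorem front_back_spec : Claim_equal_front_back := by
  intro str _
  unfold Spec_front_back
  exact (fb_main str).symm ▸ rfl
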